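-- pv_equiv track=rewrite | github.com/venkat-0706/CodeForces | Leetcode - 168/Maximize Sum of Squares of Digits.py | maxSumOfSquares
-- ===== SOURCE A (Python) =====
-- def maxSumOfSquares(num: int, sum: int) -> str:
--     if sum > 9*num:
--         return  ""
--     if sum ==0:
--         return ""
--     dev = (num,sum)
--     num_digits = dev[0]
--     rem = dev[1]
--     res = []
--     for _ in range(num_digits):
--         if rem >=9:
--             res.append('9')
--             rem -= 9
--         elif rem > 0:
--             res.append(str(rem))
--             rem = 0
--         else:
--             res.append('0')
--     return "".join(res)
-- ===== SOURCE B (Python) =====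
-- def maxSumOfSquares(num: int, sum: int) -> str:
--     # Closed-form assembly: no per-digit loop.
--     if sum > 9 * num or sum <= 0:
--         return ""
--     nines, r = divmod(sum, 9)
--     zeros = num - nines - (1 if r else 0)
--     return "9" * nines + (str(r) if r else "") + "0" * zeros
-- ===== Notes on version B (the rewrite author's own statement) =====
-- stated objective: faster
-- what changed: Replaces the per-digit greedy loop and list append/join with a closed-form divmod: nines = sum//9, the remainder digit if nonzero, and the zero padding, assembled by string repetition.
-- outside the precondition, e.g. on maxSumOfSquares(3, -3): A returns '000', B returns ''
import Mathlib
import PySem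

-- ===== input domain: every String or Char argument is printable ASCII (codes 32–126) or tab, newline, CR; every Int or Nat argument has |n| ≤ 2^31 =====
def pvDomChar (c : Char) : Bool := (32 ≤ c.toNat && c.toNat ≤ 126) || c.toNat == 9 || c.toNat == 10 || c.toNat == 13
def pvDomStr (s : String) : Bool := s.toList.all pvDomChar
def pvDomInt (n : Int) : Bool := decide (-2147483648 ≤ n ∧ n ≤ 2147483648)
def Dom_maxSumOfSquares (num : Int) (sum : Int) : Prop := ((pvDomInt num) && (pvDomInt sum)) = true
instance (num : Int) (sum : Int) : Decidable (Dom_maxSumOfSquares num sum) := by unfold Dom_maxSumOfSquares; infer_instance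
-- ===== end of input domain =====

-- B replaces A's per-digit greedy loop by a closed-form divmod assembly (fewer steps for large num);
-- Pre_ restricts to the natural domain of nonnegative digit sums.


-- ===== PORT A =====
-- one iteration of A's for-loop body, on the state (rem, res)
def aStep (st : Int × List String) : Int × List String :=
  if st.1 ≥ 9 then (st.1 - 9, st.2 ++ ["9"])
  else if st.1 > 0 then (0, st.2 ++ [PySem.Int.toStr st.1])
  else (st.1, st.2 ++ ["0"])

def maxSumOfSquares (num : Int) (sum : Int) : String :=
  if sum > 9 * num then ""
  else if sum = 0 then ""
  else
    let dev := (num, sum)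
    let num_digits := dev.1
    let rem := dev.2
    let st := (PySem.List.pyRange 0 num_digits 1).foldl (fun st _ => aStep st) (rem, ([] : List String))
    PySem.Str.join "" st.2

-- ===== PORT B =====
-- '9'*n / '0'*n and the final '+' are ported on the char list (exact), with one String.mk at the end
def repChars (c : Char) (n : Int) : List Char := List.replicate n.toNat c

def maxSumOfSquares_alt (num : Int) (sum : Int) : String :=
  if sum > 9 * num ∨ sum ≤ 0 then ""
  else
    let nines := PySem.Int.floordiv sum 9
    let r := PySem.Int.mod sum 9
    let zeros := num - nines - (if r ≠ 0 then 1 else 0)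
    String.ofList (repChars '9' nines ++ (if r ≠ 0 then PySem.Int.toChars r else []) ++ repChars '0' zeros)

-- ===== PRECONDITION & SPEC =====
-- Pre_ restricts to the natural domain of nonnegative digit sums; for sum < 0 (a malformed request)
-- A pads with '0' digits (leftover loop state) while B returns the impossibility sentinel "".
def Pre_maxSumOfSquares (num : Int) (sum : Int) : Prop := 0 ≤ sum
instance (num : Int) (sum : Int) : Decidable (Pre_maxSumOfSquares num sum) := by unfold Pre_maxSumOfSquares; infer_instance
def pvWitness_maxSumOfSquares : Int × Int := (3, 20)

def Spec_maxSumOfSquares (num : Int) (sum : Int) (out : String) : Prop := out = maxSumOfSquares_alt num sum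
instance (num : Int) (sum : Int) (out : String) : Decidable (Spec_maxSumOfSquares num sum out) := by unfold Spec_maxSumOfSquares; infer_instance

-- ===== CLAIM (what is proved, stated in full; the proofs are below) =====
def Claim_equal_maxSumOfSquares : Prop := ∀ (num : Int) (sum : Int), Dom_maxSumOfSquares num sum → Pre_maxSumOfSquares num sum → Spec_maxSumOfSquares num sum (maxSumOfSquares num sum)

-- ===== LEMMAS AND PROOFS =====

-- ''.join = flatten of the pieces (char level)
lemma chars_join_nil_eq_flatten (l : List (List Char)) :
    PySem.Chars.join [] l = l.flatten := by
  induction l with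
  | nil => simp [PySem.Chars.join_nil]
  | cons a l ih =>
    cases l with
    | nil => simp [PySem.Chars.join_singleton]
    | cons b m =>
      rw [PySem.Chars.join_cons_cons]
      simp_all

-- A's fold ignores the range elements: it only depends on the list length
lemma foldl_aStep_eq_iterate (l : List Int) (st : Int × List String) :
    l.foldl (fun st _ => aStep st) st = aStep^[l.length] st := by
  induction l generalizing st with
  | nil => rfl
  | cons a l ih => simp [List.foldl_cons, ih, Function.iterate_succ_apply]

-- characterisation of n iterations of A's loop body, for 0 ≤ rem ≤ 9*n
lemma iterate_aStep_spec (n : Nat) (rem : Int) (acc : List String)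
    (h0 : 0 ≤ rem) (h9 : rem ≤ 9 * n) :
    (aStep^[n] (rem, acc)).2 =
      acc ++ List.replicate (rem.toNat / 9) "9"
          ++ (if rem.toNat % 9 ≠ 0 then [PySem.Int.toStr (rem.toNat % 9 : Nat)] else [])
          ++ List.replicate (n - rem.toNat / 9 - (if rem.toNat % 9 ≠ 0 then 1 else 0)) "0" := by
  induction n generalizing rem acc with
  | zero =>
    have : rem = 0 := by omega
    subst this
    simp
  | succ n ih =>
    rw [Function.iterate_succ_apply]
    by_cases h : rem ≥ 9
    · have hstep : aStep (rem, acc) = (rem - 9, acc ++ ["9"]) := by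
        simp [aStep, h]
      have hq : (rem - 9).toNat / 9 = rem.toNat / 9 - 1 := by omega
      have hq1 : 1 ≤ rem.toNat / 9 := by omega
      have hr : (rem - 9).toNat % 9 = rem.toNat % 9 := by omega
      rw [hstep, ih (rem - 9) (acc ++ ["9"]) (by omega) (by omega), hq, hr]
      have e2 : ∀ b : Nat, n - (rem.toNat / 9 - 1) - b = n + 1 - rem.toNat / 9 - b := by
        intro b; omega
      rw [e2]
      have e1 : List.replicate (rem.toNat / 9) ("9" : String)
              = "9" :: List.replicate (rem.toNat / 9 - 1) "9" := by
        rw [← List.replicate_succ]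
        congr 1
        omega
      rw [e1]
      simp [List.append_assoc]
    · by_cases hp : rem > 0
      · have hstep : aStep (rem, acc) = (0, acc ++ [PySem.Int.toStr rem]) := by
          simp [aStep, h, hp]
        rw [hstep, ih 0 _ le_rfl (by positivity)]
        have hq : rem.toNat / 9 = 0 := by omega
        have hm : rem.toNat % 9 = rem.toNat := by omega
        have hcast : ((rem.toNat : Int)) = rem := by omega
        have hne : rem.toNat ≠ 0 := by omega
        rw [hq, hm, hcast]
        simp [hne, List.append_assoc]
      · have hrem : rem = 0 := by omega
        subst hrem
        have hstep : aStep (0, acc) = (0, acc ++ ["0"]) := by simp [aStep]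
        rw [hstep, ih 0 _ le_rfl (by positivity)]
        simp [List.append_assoc, List.replicate_succ]

-- main case: 0 < sum ≤ 9*num
lemma main_case (num sum : Int) (hpos : 0 < sum) (hle : sum ≤ 9 * num) :
    maxSumOfSquares num sum = maxSumOfSquares_alt num sum := by
  have hnum : 0 < num := by nlinarith
  have hA : ¬ sum > 9 * num := by omega
  have hs0 : ¬ sum = 0 := by omega
  have hB : ¬ (sum > 9 * num ∨ sum ≤ 0) := by omega
  have hBle : ¬ sum ≤ 0 := by omega
  apply String.toList_inj.mp
  simp only [maxSumOfSquares, maxSumOfSquares_alt, hA, hs0, if_false]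
  rw [foldl_aStep_eq_iterate, PySem.List.length_pyRange_one,
      show (num - 0).toNat = num.toNat from by omega,
      iterate_aStep_spec num.toNat sum [] (by omega) (by omega)]
  have hjoin : ∀ (parts : List String),
      (PySem.Str.join "" parts).toList = (parts.map String.toList).flatten := by
    intro parts
    rw [PySem.Str.toList_join]
    simpa using chars_join_nil_eq_flatten (parts.map String.toList)
  rw [hjoin]
  have hfd : PySem.Int.floordiv sum 9 = sum / 9 := PySem.Int.floordiv_eq_ediv_of_pos (by omega)
  have hmd : PySem.Int.mod sum 9 = sum % 9 := PySem.Int.mod_eq_emod_of_pos (by omega)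
  have hqc : (sum / 9).toNat = sum.toNat / 9 := by omega
  have hrc : ((sum.toNat % 9 : Nat) : Int) = sum % 9 := by omega
  by_cases hr : sum.toNat % 9 = 0
  · have hr' : sum % 9 = 0 := by omega
    have hz : (num - sum / 9 - (0 : Int)).toNat = num.toNat - sum.toNat / 9 - 0 := by omega
    simp only [hfd, hmd, hr, hr', ne_eq, not_true_eq_false, if_false,
      repChars, hz]
    simp [List.map_replicate, hqc, hBle,
      String.toList_append, String.toList_ofList,
      show (("9":String).toList) = ['9'] from rfl, show (("0":String).toList) = ['0'] from rfl]
  · have hr' : ¬ sum % 9 = 0 := by omega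
    have hz : (num - sum / 9 - (1 : Int)).toNat = num.toNat - sum.toNat / 9 - 1 := by omega
    simp only [hfd, hmd, hr, hr', ne_eq, not_false_eq_true, if_true, repChars, hz]
    rw [← hrc]
    simp [List.map_replicate, hqc, hBle, PySem.Int.toList_toStr,
      String.toList_append, String.toList_ofList,
      show (("9":String).toList) = ['9'] from rfl, show (("0":String).toList) = ['0'] from rfl]

-- ===== VERDICT (by name: the statement is the Claim_ definition above) =====
theorem maxSumOfSquares_spec : Claim_equal_maxSumOfSquares := by
  intro num sum _hd hpre
  unfold Spec_maxSumOfSquares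
  by_cases h1 : sum > 9 * num
  · simp [maxSumOfSquares, maxSumOfSquares_alt, h1]
  · by_cases h2 : sum = 0
    · subst h2
      simp [maxSumOfSquares, maxSumOfSquares_alt, h1]
    · exact main_case num sum (by unfold Pre_maxSumOfSquares at hpre; omega) (by omega)
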